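-- pv_equiv track=rewrite | github.com/OriShapira/ENDow | run_inference_qmsum.py | __get_transcript_chunk
-- ===== SOURCE A (Python) =====
-- def __get_transcript_chunk(transcript_utterances, start_idx, max_len):
--     chunk_str = ''
--     chunk_token_len = 0
--     last_utt_idx = -1
--     for utt_idx_relative, utt in enumerate(transcript_utterances[start_idx:]):
--         utt_token_len = len(utt.split())
--         if chunk_token_len + utt_token_len >= max_len:
--             break  # don't add this chunk because it will cause surpassing of the max_len
--         chunk_str += ' ' + utt
--         chunk_token_len += utt_token_len
--         last_utt_idx = start_idx + utt_idx_relative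
--     return chunk_str, last_utt_idx
-- ===== SOURCE B (Python) =====
-- def __get_transcript_chunk(transcript_utterances, start_idx, max_len):
--     # Prefix-sum decomposition: cumulative token counts, first index reaching the
--     # limit, then one slice-and-join -- instead of accumulating a string in a loop.
--     suffix = transcript_utterances[start_idx:]
--     cums = []
--     total = 0
--     for utt in suffix:
--         total += len(utt.split())
--         cums.append(total)
--     cutoff = next((i for i, c in enumerate(cums) if c >= max_len), len(suffix))
--     if cutoff == 0:
--         return '', -1
--     return ' ' + ' '.join(suffix[:cutoff]), start_idx + cutoff - 1
-- ===== Notes on version B (the rewrite author's own statement) =====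
-- stated objective: simpler
-- what changed: Replaces the break-in-the-middle string-accumulating loop with a prefix-sum of token counts, a first-index-reaching-the-limit search, and a single slice + ' '.join to build the chunk.
import Mathlib
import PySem

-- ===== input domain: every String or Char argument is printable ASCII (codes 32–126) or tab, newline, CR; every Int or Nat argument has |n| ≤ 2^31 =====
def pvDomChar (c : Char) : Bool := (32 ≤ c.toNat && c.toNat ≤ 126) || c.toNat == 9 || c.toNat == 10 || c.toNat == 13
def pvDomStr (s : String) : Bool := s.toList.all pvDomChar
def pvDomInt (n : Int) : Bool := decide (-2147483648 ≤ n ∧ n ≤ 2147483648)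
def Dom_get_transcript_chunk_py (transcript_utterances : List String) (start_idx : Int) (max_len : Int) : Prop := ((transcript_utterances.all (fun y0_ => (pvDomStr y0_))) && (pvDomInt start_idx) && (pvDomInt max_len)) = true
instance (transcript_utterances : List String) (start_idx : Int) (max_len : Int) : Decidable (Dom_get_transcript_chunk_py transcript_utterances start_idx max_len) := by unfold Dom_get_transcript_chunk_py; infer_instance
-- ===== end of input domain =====

-- B replaces A's break-in-the-middle string-accumulating loop by a prefix-sum of token
-- counts, a first-index-reaching-the-limit search, and one slice + join (objective: simpler).

-- ===== PORT A =====
-- the for-loop over enumerate(transcript_utterances[start_idx:]) with its break;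
-- r is utt_idx_relative, state = (chunk_str, chunk_token_len, last_utt_idx)
def pvLoopA (start_idx max_len : Int) : List String → Nat → String → Int → Int → String × Int
  | [], _, chunk_str, _, last_utt_idx => (chunk_str, last_utt_idx)
  | utt :: rest, r, chunk_str, chunk_token_len, last_utt_idx =>
    let utt_token_len : Int := ((PySem.Str.split₀ utt).length : Int)
    if chunk_token_len + utt_token_len ≥ max_len then (chunk_str, last_utt_idx)
    else pvLoopA start_idx max_len rest (r + 1) (chunk_str ++ (" " ++ utt))
      (chunk_token_len + utt_token_len) (start_idx + (r : Int))

def get_transcript_chunk_py (transcript_utterances : List String) (start_idx : Int) (max_len : Int) : String × Int :=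
  pvLoopA start_idx max_len (PySem.List.slice transcript_utterances (some start_idx) none) 0 "" 0 (-1)

-- ===== PORT B =====
-- cumulative token counts of the suffix (the cums/total loop of Source B)
def pvCums : List String → Int → List Int
  | [], _ => []
  | utt :: rest, total =>
    let total' := total + ((PySem.Str.split₀ utt).length : Int)
    total' :: pvCums rest total'

-- next((i for i, c in enumerate(cums) if c >= max_len), len(cums))
def pvFirstGe (max_len : Int) : List Int → Nat
  | [] => 0
  | c :: rest => if c ≥ max_len then 0 else pvFirstGe max_len rest + 1

def get_transcript_chunk_py_alt (transcript_utterances : List String) (start_idx : Int) (max_len : Int) : String × Int :=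
  let suffix := PySem.List.slice transcript_utterances (some start_idx) none
  let cutoff := pvFirstGe max_len (pvCums suffix 0)
  if cutoff = 0 then ("", -1)
  else (" " ++ PySem.Str.join " " (suffix.take cutoff), start_idx + (cutoff : Int) - 1)

-- ===== PRECONDITION & SPEC =====
def Spec_get_transcript_chunk_py (transcript_utterances : List String) (start_idx : Int) (max_len : Int) (out : String × Int) : Prop := out = get_transcript_chunk_py_alt transcript_utterances start_idx max_len
instance (transcript_utterances : List String) (start_idx : Int) (max_len : Int) (out : String × Int) : Decidable (Spec_get_transcript_chunk_py transcript_utterances start_idx max_len out) := by unfold Spec_get_transcript_chunk_py; infer_instance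

-- ===== CLAIM (what is proved, stated in full; the proofs are below) =====
def Claim_equal_get_transcript_chunk_py : Prop := ∀ (transcript_utterances : List String) (start_idx : Int) (max_len : Int), Dom_get_transcript_chunk_py transcript_utterances start_idx max_len → Spec_get_transcript_chunk_py transcript_utterances start_idx max_len (get_transcript_chunk_py transcript_utterances start_idx max_len)

-- ===== LEMMAS AND PROOFS =====

lemma pv_join_cons (a b : String) (rest : List String) :
    PySem.Str.join " " (a :: b :: rest) = a ++ " " ++ PySem.Str.join " " (b :: rest) := by
  simp only [PySem.Str.join, List.map_cons]
  rw [PySem.Chars.join_cons_cons]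
  rw [show a.toList ++ " ".toList ++ PySem.Chars.join " ".toList (b.toList :: List.map String.toList rest)
      = a.toList ++ (" ".toList ++ PySem.Chars.join " ".toList (b.toList :: List.map String.toList rest)) from List.append_assoc ..]
  simp [String.ofList_append, String.append_assoc]
  rw [show (' ' :: PySem.Chars.join [' '] (b.toList :: List.map String.toList rest)) = [' '] ++ PySem.Chars.join [' '] (b.toList :: List.map String.toList rest) from rfl, String.ofList_append]

-- loop invariant: A's loop equals B's cutoff/slice/join characterisation
lemma pv_loop_eq (start m : Int) : ∀ (l : List String) (r : Nat) (chunk : String) (s last : Int),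
    pvLoopA start m l r chunk s last =
      (if pvFirstGe m (pvCums l s) = 0 then (chunk, last)
       else (chunk ++ (" " ++ PySem.Str.join " " (l.take (pvFirstGe m (pvCums l s)))),
             start + (r : Int) + ((pvFirstGe m (pvCums l s) : Int)) - 1)) := by
  intro l
  induction l with
  | nil => intro r chunk s last; simp [pvLoopA, pvCums, pvFirstGe]
  | cons u rest ih =>
    intro r chunk s last
    simp only [pvLoopA, pvCums, pvFirstGe]
    set t : Int := ((PySem.Str.split₀ u).length : Int) with ht
    by_cases hb : s + t ≥ m
    · simp [hb]
    · simp only [if_neg hb]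
      rw [ih]
      generalize hg : pvFirstGe m (pvCums rest (s + t)) = k
      by_cases hk0 : k = 0
      · subst hk0
        rw [if_pos rfl, if_neg (by omega : ¬ (0 : Nat) + 1 = 0)]
        simp only [Prod.mk.injEq]
        constructor
        · simp [PySem.Str.join, PySem.Chars.join_singleton]
        · push_cast; ring
      · rw [if_neg hk0, if_neg (by omega : ¬ k + 1 = 0)]
        have hrest : rest ≠ [] := by
          intro h; subst h; simp [pvCums, pvFirstGe] at hg; omega
        obtain ⟨v, vs, hv⟩ : ∃ v vs, rest = v :: vs := by
          cases rest with
          | nil => exact absurd rfl hrest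
          | cons v vs => exact ⟨v, vs, rfl⟩
        have htake : rest.take k = v :: (vs.take (k - 1)) := by
          subst hv; cases k with
          | zero => exact absurd rfl hk0
          | succ n => simp
        simp only [Prod.mk.injEq]
        constructor
        · rw [List.take_succ_cons, htake, pv_join_cons, ← htake]
          simp [String.append_assoc]
        · push_cast; ring

theorem pv_main (transcript_utterances : List String) (start_idx : Int) (max_len : Int) :
    get_transcript_chunk_py transcript_utterances start_idx max_len
      = get_transcript_chunk_py_alt transcript_utterances start_idx max_len := by
  unfold get_transcript_chunk_py get_transcript_chunk_py_alt
  rw [pv_loop_eq]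
  set suffix := PySem.List.slice transcript_utterances (some start_idx) none
  by_cases h : pvFirstGe max_len (pvCums suffix 0) = 0
  · simp [h]
  · rw [if_neg h, if_neg h]
    simp only [Prod.mk.injEq]
    constructor
    · simp
    · push_cast; ring

-- ===== VERDICT (by name: the statement is the Claim_ definition above) =====
theorem get_transcript_chunk_py_spec : Claim_equal_get_transcript_chunk_py := by
  intro tu si ml _
  exact pv_main tu si ml
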